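-- pv_equiv track=rewrite | github.com/djb258/barton-outreach-core | hubs/blog-content/imo/middle/scrape_leadership_pages.py | dedup_and_pick_best
-- ===== SOURCE A (Python) =====
-- from typing import Dict, List, Optional, Tuple, Set
--
-- def dedup_and_pick_best(all_people: List[Dict], filled_slots: Set) -> List[Dict]:
--     """
--     Dedup scraped people: one person per (outreach_id, slot_type).
--     Prefer: has LinkedIn > has email > has title > structured_card source.
--     Skip already-filled slots.
--     """
--     # Group by (outreach_id, slot_type)
--     buckets: Dict[Tuple[str, str], List[Dict]] = {}
--     for p in all_people:
--         if not p.get('slot_type'):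
--             continue
--         key = (p['outreach_id'], p['slot_type'])
--         if key in filled_slots:
--             continue
--         buckets.setdefault(key, []).append(p)
--
--     result = []
--     for key, candidates in buckets.items():
--         # Score each candidate
--         def score(c):
--             s = 0
--             if c.get('linkedin_url'):
--                 s += 10
--             if c.get('email'):
--                 s += 5
--             if c.get('title'):
--                 s += 3
--             if c.get('source') == 'structured_card':
--                 s += 2
--             if c.get('source') == 'heading_pattern':
--                 s += 1
--             return s
--
--         best = max(candidates, key=score)
--         result.append(best)
--
--     return result
-- ===== SOURCE B (Python) =====
-- def _score(c):
--     s = 0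
--     if c.get('linkedin_url'):
--         s += 10
--     if c.get('email'):
--         s += 5
--     if c.get('title'):
--         s += 3
--     if c.get('source') == 'structured_card':
--         s += 2
--     if c.get('source') == 'heading_pattern':
--         s += 1
--     return s
--
--
-- def dedup_and_pick_best(all_people, filled_slots):
--     # Single pass: keep the best (score, person) per (outreach_id, slot_type).
--     best = {}
--     for p in all_people:
--         slot = p.get('slot_type')
--         if not slot:
--             continue
--         key = (p['outreach_id'], slot)
--         if key in filled_slots:
--             continue
--         s = _score(p)
--         cur = best.get(key)
--         if cur is None or s > cur[0]:
--             best[key] = (s, p)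
--     return [v[1] for v in best.values()]
-- ===== Notes on version B (the rewrite author's own statement) =====
-- stated objective: simpler
-- what changed: Replaces A's two-phase grouping (build per-key candidate lists, then a separate max-by-score pass over each bucket) with a single pass that keeps only the current best (score, person) per (outreach_id, slot_type) key, updating on strictly greater score to preserve max()'s first-wins tie-breaking.
import Mathlib
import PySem

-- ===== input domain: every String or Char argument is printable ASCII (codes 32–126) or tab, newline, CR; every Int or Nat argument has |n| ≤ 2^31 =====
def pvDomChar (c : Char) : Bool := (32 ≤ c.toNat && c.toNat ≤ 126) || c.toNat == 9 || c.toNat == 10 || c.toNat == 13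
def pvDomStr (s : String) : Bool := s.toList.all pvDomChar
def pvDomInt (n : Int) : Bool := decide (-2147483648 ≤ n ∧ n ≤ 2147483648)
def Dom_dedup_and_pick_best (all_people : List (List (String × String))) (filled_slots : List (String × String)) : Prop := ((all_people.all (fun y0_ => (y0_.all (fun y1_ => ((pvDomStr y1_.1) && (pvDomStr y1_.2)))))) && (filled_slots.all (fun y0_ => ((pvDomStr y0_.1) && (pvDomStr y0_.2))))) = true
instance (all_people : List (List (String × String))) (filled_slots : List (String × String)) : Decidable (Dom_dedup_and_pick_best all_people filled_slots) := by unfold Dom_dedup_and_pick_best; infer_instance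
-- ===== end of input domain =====

-- B replaces A's bucket-then-max two-phase grouping by a single pass keeping the best-scored
-- person per slot key (objective: simpler; return value only, neither version mutates inputs).

-- ===== PORT A =====
-- p.get(k) on a person dict (association list, first match)
def pvGet? (p : List (String × String)) (k : String) : Option String :=
  (p.find? (fun kv => kv.1 == k)).map (·.2)

-- Python truthiness of an Optional[str]
def pvTruthy (o : Option String) : Bool :=
  match o with
  | some v => v != ""
  | none => false

-- the inner `score` closure: s = 0; s += … for each branch
def pvScore (c : List (String × String)) : Int :=
  (if pvTruthy (pvGet? c "linkedin_url") then (10 : Int) else 0) +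
  (if pvTruthy (pvGet? c "email") then 5 else 0) +
  (if pvTruthy (pvGet? c "title") then 3 else 0) +
  (if pvGet? c "source" == some "structured_card" then 2 else 0) +
  (if pvGet? c "source" == some "heading_pattern" then 1 else 0)

-- key = (p['outreach_id'], p['slot_type']); Pre_ guarantees 'outreach_id' is present
-- (Python raises KeyError otherwise), and 'slot_type' is present by the truthiness guard.
def pvKey (p : List (String × String)) : String × String :=
  ((pvGet? p "outreach_id").getD "", (pvGet? p "slot_type").getD "")

-- one iteration of A's grouping loop: buckets.setdefault(key, []).append(p)
def pvBucketsStep (filled_slots : List (String × String))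
    (d : PySem.Dict (String × String) (List (List (String × String))))
    (p : List (String × String)) :
    PySem.Dict (String × String) (List (List (String × String))) :=
  if pvTruthy (pvGet? p "slot_type") then
    let key := pvKey p
    if filled_slots.contains key then d
    else d.modify key [] (· ++ [p])
  else d

-- max(candidates, key=score): first element with maximal score
def pvMaxByScore (h : List (String × String)) (t : List (List (String × String))) :
    List (String × String) :=
  t.foldl (fun b c => if pvScore b < pvScore c then c else b) h

def dedup_and_pick_best (all_people : List (List (String × String))) (filled_slots : List (String × String)) : List (List (String × String)) :=
  let buckets := all_people.foldl (pvBucketsStep filled_slots) PySem.Dict.empty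
  buckets.items.foldl (fun res kc =>
    match kc.2 with
    | [] => res                        -- unreachable: buckets hold ≥ 1 candidate
    | h :: t => res ++ [pvMaxByScore h t]) []

-- ===== PORT B =====
-- one iteration of B's single pass: keep (score, person) with the strictly greater score
def pvBestStep (filled_slots : List (String × String))
    (d : PySem.Dict (String × String) (Int × List (String × String)))
    (p : List (String × String)) :
    PySem.Dict (String × String) (Int × List (String × String)) :=
  if pvTruthy (pvGet? p "slot_type") then
    let key := pvKey p
    if filled_slots.contains key then d
    else
      let s := pvScore p
      match d.get? key with
      | none => d.insert key (s, p)
      | some cur => if cur.1 < s then d.insert key (s, p) else d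
  else d

def dedup_and_pick_best_alt (all_people : List (List (String × String))) (filled_slots : List (String × String)) : List (List (String × String)) :=
  ((all_people.foldl (pvBestStep filled_slots) PySem.Dict.empty).values).map (·.2)

-- ===== PRECONDITION & SPEC =====
-- Pre_ excludes exactly the inputs where the Python raises KeyError: a person with a truthy
-- 'slot_type' but no 'outreach_id' key (both A and B raise there, on the same line of code).
def Pre_dedup_and_pick_best (all_people : List (List (String × String))) (filled_slots : List (String × String)) : Prop :=
  ∀ p ∈ all_people, pvTruthy (pvGet? p "slot_type") = true → (pvGet? p "outreach_id").isSome = true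

instance (all_people : List (List (String × String))) (filled_slots : List (String × String)) : Decidable (Pre_dedup_and_pick_best all_people filled_slots) := by
  unfold Pre_dedup_and_pick_best; infer_instance

def pvWitness_dedup_and_pick_best : (List (List (String × String))) × (List (String × String)) :=
  ([[("slot_type", "ceo"), ("outreach_id", "1"), ("email", "a@b.c")],
    [("slot_type", "ceo"), ("outreach_id", "1"), ("linkedin_url", "L")]],
   [("1", "cfo")])

def Spec_dedup_and_pick_best (all_people : List (List (String × String))) (filled_slots : List (String × String)) (out : List (List (String × String))) : Prop := out = dedup_and_pick_best_alt all_people filled_slots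
instance (all_people : List (List (String × String))) (filled_slots : List (String × String)) (out : List (List (String × String))) : Decidable (Spec_dedup_and_pick_best all_people filled_slots out) := by unfold Spec_dedup_and_pick_best; infer_instance

-- ===== CLAIM (what is proved, stated in full; the proofs are below) =====
def Claim_equal_dedup_and_pick_best : Prop := ∀ (all_people : List (List (String × String))) (filled_slots : List (String × String)), Dom_dedup_and_pick_best all_people filled_slots → Pre_dedup_and_pick_best all_people filled_slots → Spec_dedup_and_pick_best all_people filled_slots (dedup_and_pick_best all_people filled_slots)

-- ===== LEMMAS AND PROOFS =====

-- score-and-person of the best candidate of a bucket (B stores this pair incrementally)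
def pvPick : List (List (String × String)) → Int × List (String × String)
  | [] => (0, [])
  | h :: t => t.foldl (fun b c => if b.1 < pvScore c then (pvScore c, c) else b) (pvScore h, h)

-- the entry-wise correspondence between A's buckets and B's best dict
def pvF (kc : (String × String) × List (List (String × String))) :
    (String × String) × (Int × List (String × String)) :=
  (kc.1, pvPick kc.2)

theorem pvPick_pair (t : List (List (String × String))) (b : List (String × String)) :
    t.foldl (fun b c => if b.1 < pvScore c then (pvScore c, c) else b) (pvScore b, b)
      = (pvScore (t.foldl (fun b c => if pvScore b < pvScore c then c else b) b),
         t.foldl (fun b c => if pvScore b < pvScore c then c else b) b) := by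
  induction t generalizing b with
  | nil => rfl
  | cons c t ih =>
      simp only [List.foldl_cons]
      by_cases h : pvScore b < pvScore c <;> simp [h, ih]

theorem pvPick_append (h : List (String × String)) (t : List (List (String × String)))
    (p : List (String × String)) :
    pvPick (h :: (t ++ [p]))
      = if (pvPick (h :: t)).1 < pvScore p then (pvScore p, p) else pvPick (h :: t) := by
  simp [pvPick, List.foldl_append]

theorem pvKeys_of_items_map (dA : PySem.Dict (String × String) (List (List (String × String))))
    (dB : PySem.Dict (String × String) (Int × List (String × String)))
    (h : dB.items = dA.items.map pvF) : dB.keys = dA.keys := by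
  simp only [PySem.Dict.keys, h, List.map_map]
  rfl

theorem pvStep (fs : List (String × String)) (p : List (String × String))
    (dA : PySem.Dict (String × String) (List (List (String × String))))
    (dB : PySem.Dict (String × String) (Int × List (String × String)))
    (hN : dA.keys.Nodup) (hI : dB.items = dA.items.map pvF)
    (hE : ∀ kc ∈ dA.items, kc.2 ≠ []) :
    (pvBestStep fs dB p).items = (pvBucketsStep fs dA p).items.map pvF
      ∧ (pvBucketsStep fs dA p).keys.Nodup
      ∧ ∀ kc ∈ (pvBucketsStep fs dA p).items, kc.2 ≠ [] := by
  by_cases hslot : pvTruthy (pvGet? p "slot_type")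
  · by_cases hfill : fs.contains (pvKey p)
    · simp only [pvBestStep, pvBucketsStep, hslot, hfill, if_true]
      exact ⟨hI, hN, hE⟩
    · have hkeysB : dB.keys = dA.keys := pvKeys_of_items_map dA dB hI
      by_cases hc : dA.contains (pvKey p)
      · obtain ⟨c, hget⟩ : ∃ c, dA.get? (pvKey p) = some c := by
          rw [PySem.Dict.contains_eq_isSome_get?] at hc
          cases h' : dA.get? (pvKey p)
          · rw [h'] at hc; simp at hc
          · exact ⟨_, rfl⟩
        have hmem : (pvKey p, c) ∈ dA.items := PySem.Dict.mem_items_of_get?_eq_some dA hget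
        obtain ⟨h0, t0, rfl⟩ : ∃ h0 t0, c = h0 :: t0 := by
          cases c with
          | nil => exact absurd rfl (hE _ hmem)
          | cons h0 t0 => exact ⟨h0, t0, rfl⟩
        have hNB : dB.keys.Nodup := hkeysB ▸ hN
        have hmemB : (pvKey p, pvPick (h0 :: t0)) ∈ dB.items := by
          rw [hI]; exact List.mem_map_of_mem hmem
        have hgetB : dB.get? (pvKey p) = some (pvPick (h0 :: t0)) :=
          PySem.Dict.get?_of_mem_items dB hmemB hNB
        have hcB : dB.contains (pvKey p) = true := by
          rw [PySem.Dict.contains_eq_isSome_get?, hgetB]; rfl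
        have hmod : dA.modify (pvKey p) [] (· ++ [p]) = dA.insert (pvKey p) ((h0 :: t0) ++ [p]) := by
          show dA.insert (pvKey p) (dA.getD (pvKey p) [] ++ [p]) = _
          rw [PySem.Dict.getD_of_get?_eq_some _ _ hget]
        have huniq : ∀ q ∈ dA.items, q.1 = pvKey p → q.2 = h0 :: t0 := by
          intro q hq hq1
          have h2 : dA.get? q.1 = some q.2 := PySem.Dict.get?_of_mem_items dA hq hN
          rw [hq1, hget] at h2
          exact (Option.some.inj h2).symm
        simp only [pvBestStep, pvBucketsStep, hslot, hfill, if_true, if_false, hgetB, hmod,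
          Bool.false_eq_true]
        refine ⟨?_, ?_, ?_⟩
        · rw [PySem.Dict.items_insert_of_contains _ _ hc, List.map_map]
          by_cases hlt : (pvPick (h0 :: t0)).1 < pvScore p
          · simp only [hlt, if_true]
            rw [PySem.Dict.items_insert_of_contains _ _ hcB, hI, List.map_map]
            apply List.map_congr_left
            intro q hq
            simp only [Function.comp_apply]
            by_cases hqk : q.1 = pvKey p
            · have h2 := huniq q hq hqk
              simp [pvF, hqk, h2, pvPick_append, hlt]
            · simp [pvF, hqk]
          · simp only [hlt, if_false]
            rw [hI]
            apply List.map_congr_left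
            intro q hq
            simp only [Function.comp_apply]
            by_cases hqk : q.1 = pvKey p
            · have h2 := huniq q hq hqk
              simp [pvF, hqk, h2, pvPick_append, hlt]
            · simp [pvF, hqk]
        · rw [PySem.Dict.keys_insert_of_contains _ _ hc]
          exact hN
        · intro kc hkc
          rw [PySem.Dict.items_insert_of_contains _ _ hc] at hkc
          obtain ⟨q, hq, hqe⟩ := List.mem_map.1 hkc
          by_cases hqk : q.1 = pvKey p
          · simp only [hqk, BEq.rfl, if_true] at hqe
            rw [← hqe]; simp
          · have : (q.1 == pvKey p) = false := by simp [hqk]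
            rw [this] at hqe; simp at hqe
            exact hqe ▸ hE q hq
      · have hcB : dB.contains (pvKey p) = false := by
          have h1 := PySem.Dict.contains_iff_mem_keys dB (pvKey p)
          have h2 := PySem.Dict.contains_iff_mem_keys dA (pvKey p)
          rw [hkeysB] at h1
          cases h3 : dB.contains (pvKey p)
          · rfl
          · exact absurd (h2.2 (h1.1 h3)) (by simp [hc])
        have hgetB : dB.get? (pvKey p) = none :=
          (PySem.Dict.get?_eq_none_iff_contains dB (pvKey p)).2 hcB
        have hmod : dA.modify (pvKey p) [] (· ++ [p]) = dA.insert (pvKey p) [p] := by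
          show dA.insert (pvKey p) (dA.getD (pvKey p) [] ++ [p]) = _
          rw [PySem.Dict.getD_of_not_contains _ _ (by simpa using hc)]
          rfl
        simp only [pvBestStep, pvBucketsStep, hslot, hfill, if_true, if_false, hgetB, hmod,
          Bool.false_eq_true]
        refine ⟨?_, ?_, ?_⟩
        · rw [PySem.Dict.items_insert_of_not_contains _ _ hcB,
              PySem.Dict.items_insert_of_not_contains _ _ (by simpa using hc), hI, List.map_append]
          rfl
        · exact PySem.Dict.nodup_keys_insert _ _ _ hN
        · intro kc hkc
          rw [PySem.Dict.items_insert_of_not_contains _ _ (by simpa using hc)] at hkc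
          rcases List.mem_append.1 hkc with h | h
          · exact hE _ h
          · simp at h; rw [h]; simp
  · simp only [pvBestStep, pvBucketsStep, hslot]
    exact ⟨hI, hN, hE⟩

theorem pvInv (fs : List (String × String)) (l : List (List (String × String)))
    (dA : PySem.Dict (String × String) (List (List (String × String))))
    (dB : PySem.Dict (String × String) (Int × List (String × String)))
    (hN : dA.keys.Nodup) (hI : dB.items = dA.items.map pvF)
    (hE : ∀ kc ∈ dA.items, kc.2 ≠ []) :
    (l.foldl (pvBestStep fs) dB).items = (l.foldl (pvBucketsStep fs) dA).items.map pvF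
      ∧ (l.foldl (pvBucketsStep fs) dA).keys.Nodup
      ∧ ∀ kc ∈ (l.foldl (pvBucketsStep fs) dA).items, kc.2 ≠ [] := by
  induction l generalizing dA dB with
  | nil => exact ⟨hI, hN, hE⟩
  | cons p l ih =>
      obtain ⟨h1, h2, h3⟩ := pvStep fs p dA dB hN hI hE
      exact ih _ _ h2 h1 h3

theorem dedup_and_pick_best_spec : Claim_equal_dedup_and_pick_best := by
  intro all_people filled_slots _ _
  unfold Spec_dedup_and_pick_best dedup_and_pick_best dedup_and_pick_best_alt
  obtain ⟨hI, hN, hE⟩ := pvInv filled_slots all_people PySem.Dict.empty PySem.Dict.empty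
    (by simp [PySem.Dict.keys, PySem.Dict.empty]) rfl (by simp [PySem.Dict.empty])
  have hvals : (all_people.foldl (pvBestStep filled_slots) PySem.Dict.empty).values
      = ((all_people.foldl (pvBucketsStep filled_slots) PySem.Dict.empty).items.map pvF).map (·.2) := by
    rw [← hI]; rfl
  rw [hvals, List.map_map, List.map_map]
  rw [PySem.List.foldl_congr_mem _ _
    (fun res kc => res ++ [(pvPick kc.2).2]) _ ?_]
  · rw [PySem.List.foldl_append_singleton_eq_map]
    rfl
  · intro acc kc hkc
    have := hE kc hkc
    cases h : kc.2 with
    | nil => exact absurd h this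
    | cons h0 t0 =>
        simp only [h]
        congr 1
        simp [pvPick, pvMaxByScore, pvPick_pair]
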